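-- pv_equiv track=rewrite | github.com/quepas/advent-of-code | 2015/01/run.py | count_floors_scan
-- ===== SOURCE A (Python) =====
-- def count_floors_scan(line: str) -> tuple[int, int]:
--     """Straight forward scan-line approach"""
--     basement_entry = len(line)
--     end_floor = 0
--     for i in range(len(line)):
--         end_floor += 1 if line[i] == "(" else -1
--         if end_floor == -1:
--             basement_entry = min(basement_entry, i + 1)
--     return end_floor, basement_entry
-- ===== SOURCE B (Python) =====
-- def count_floors_scan(line: str) -> tuple[int, int]:
--     """Closed-form net delta plus a prefix-floor list searched with .index()."""
--     end_floor = 2 * line.count("(") - len(line)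
--     running = []
--     f = 0
--     for ch in line:
--         f = f + 1 if ch == "(" else f - 1
--         running.append(f)
--     try:
--         basement_entry = running.index(-1) + 1
--     except ValueError:
--         basement_entry = len(line)
--     return end_floor, basement_entry
-- ===== Notes on version B (the rewrite author's own statement) =====
-- stated objective: alternative
-- what changed: The net floor is computed in closed form from the count of opening parentheses, and the basement index is obtained by building the list of running prefix floors and locating the first -1 with list.index, instead of A's single fused scan folding min over all hits.
import Mathlib
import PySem

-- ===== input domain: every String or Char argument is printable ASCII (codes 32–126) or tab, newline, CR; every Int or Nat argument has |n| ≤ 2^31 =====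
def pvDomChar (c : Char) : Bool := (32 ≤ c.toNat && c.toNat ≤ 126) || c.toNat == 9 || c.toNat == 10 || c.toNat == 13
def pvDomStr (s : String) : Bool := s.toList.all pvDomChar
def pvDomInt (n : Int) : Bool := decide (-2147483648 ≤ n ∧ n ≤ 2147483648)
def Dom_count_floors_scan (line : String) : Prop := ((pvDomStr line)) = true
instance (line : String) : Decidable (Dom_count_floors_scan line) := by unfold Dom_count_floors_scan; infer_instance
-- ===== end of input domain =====

-- B replaces A's fused min-folding scan by a closed-form net delta plus a prefix-floor
-- list searched with list.index for the first -1 (objective: alternative).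

-- ===== PORT A =====
-- A's `for i in range(len(line))` with `line[i]` visits the characters in order with
-- their index; ported as structural recursion carrying (i, end_floor, basement_entry).
def pvALoop : List Char → Int → Int → Int → Int × Int
  | [], _, ef, be => (ef, be)
  | c :: cs, i, ef, be =>
    let ef' := ef + (if c = '(' then 1 else -1)
    let be' := if ef' = -1 then min be (i + 1) else be
    pvALoop cs (i + 1) ef' be'

def count_floors_scan (line : String) : Int × Int :=
  pvALoop line.toList 0 0 (line.toList.length : Int)

-- ===== PORT B =====
-- B's append-building loop over `for ch in line`: the running prefix floors.
def pvRunning : List Char → Int → List Int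
  | [], _ => []
  | c :: cs, f =>
    let f' := if c = '(' then f + 1 else f - 1
    f' :: pvRunning cs f'

-- `running.index(-1) + 1`, with the ValueError branch giving len(line).
def count_floors_scan_alt (line : String) : Int × Int :=
  let cs := line.toList
  let end_floor : Int := 2 * (cs.count '(' : Int) - (cs.length : Int)
  let basement_entry : Int :=
    match PySem.List.index? (pvRunning cs 0) (-1) with
    | some k => (k : Int) + 1
    | none => (cs.length : Int)
  (end_floor, basement_entry)

-- ===== PRECONDITION & SPEC =====
def Spec_count_floors_scan (line : String) (out : Int × Int) : Prop := out = count_floors_scan_alt line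
instance (line : String) (out : Int × Int) : Decidable (Spec_count_floors_scan line out) := by unfold Spec_count_floors_scan; infer_instance

-- ===== CLAIM =====
def Claim_equal_count_floors_scan : Prop := ∀ (line : String), Dom_count_floors_scan line → Spec_count_floors_scan line (count_floors_scan line)

-- ===== LEMMAS AND PROOFS =====

-- First component: A's fold accumulates exactly 2*count('(') - length.
theorem pvALoop_fst (cs : List Char) : ∀ (i ef be : Int),
    (pvALoop cs i ef be).1 = ef + 2 * (cs.count '(' : Int) - (cs.length : Int) := by
  induction cs with
  | nil => intro i ef be; simp [pvALoop]
  | cons c cs ih =>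
    intro i ef be
    by_cases hc : c = '('
    · simp [pvALoop, hc, ih]; ring
    · simp [pvALoop, hc, ih]; ring

-- Once basement_entry is ≤ every future i+1, the min never changes it again.
theorem pvALoop_snd_frozen (cs : List Char) : ∀ (i ef be : Int), be ≤ i + 1 →
    (pvALoop cs i ef be).2 = be := by
  induction cs with
  | nil => intro i ef be _; simp [pvALoop]
  | cons c cs ih =>
    intro i ef be hbe
    simp only [pvALoop]
    by_cases h : ef + (if c = '(' then 1 else -1) = -1
    · rw [if_pos h]
      have hm : min be (i + 1) = be := by omega
      rw [hm]
      exact ih (i + 1) _ be (by omega)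
    · rw [if_neg h]
      exact ih (i + 1) _ be (by omega)

-- Second component: A's min-fold with default i + remaining length equals the
-- position of the first -1 in the running prefix floors.
theorem pvALoop_snd (cs : List Char) : ∀ (i ef : Int),
    (pvALoop cs i ef (i + (cs.length : Int))).2 =
      (match PySem.List.index? (pvRunning cs ef) (-1) with
       | some k => i + 1 + (k : Int)
       | none => i + (cs.length : Int)) := by
  induction cs with
  | nil => intro i ef; simp [pvALoop, pvRunning, PySem.List.index?]
  | cons c cs ih =>
    intro i ef
    have hstep : ef + (if c = '(' then 1 else -1) = (if c = '(' then ef + 1 else ef - 1) := by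
      split_ifs <;> ring
    have hlen : (i + ((c :: cs).length : Int)) = (i + 1) + (cs.length : Int) := by
      simp [List.length_cons]; ring
    simp only [pvALoop, pvRunning]
    by_cases h : ef + (if c = '(' then 1 else -1) = -1
    · rw [if_pos h]
      have h' : (if c = '(' then ef + 1 else ef - 1) = -1 := by rw [← hstep]; exact h
      rw [h', PySem.List.index?_cons_self]
      have hmin : min (i + ((c :: cs).length : Int)) (i + 1) = i + 1 := by
        rw [hlen]; omega
      rw [hmin, pvALoop_snd_frozen cs (i + 1) _ _ (by omega)]
      simp
    · rw [if_neg h]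
      have h' : (if c = '(' then ef + 1 else ef - 1) ≠ -1 := by rw [← hstep]; exact h
      rw [hstep, PySem.List.index?_cons_of_ne _ h', hlen, ih (i + 1)]
      cases hI : PySem.List.index? (pvRunning cs (if c = '(' then ef + 1 else ef - 1)) (-1) with
      | none => simp
      | some k => simp; ring

-- ===== VERDICT =====
theorem count_floors_scan_spec : Claim_equal_count_floors_scan := by
  intro line _
  unfold Spec_count_floors_scan count_floors_scan count_floors_scan_alt
  refine Prod.ext ?_ ?_
  · rw [pvALoop_fst]; ring
  · rw [show ((line.toList.length : Int)) = 0 + (line.toList.length : Int) from (zero_add _).symm,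
        pvALoop_snd]
    cases hI : PySem.List.index? (pvRunning line.toList 0) (-1) with
    | none => rw [PySem.List.index?_eq_idxOf?] at hI; simp [hI]
    | some k => rw [PySem.List.index?_eq_idxOf?] at hI; simp [hI]; ring
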